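-- pv_equiv track=rewrite | github.com/Trash-Bud/FPRO | Coisas a q não dei nome e agora não faço a ideia a q REs pertencem/untitled0.py | local_minima
-- ===== SOURCE A (Python) =====
-- import math
--
-- def local_minima(alist, n):
--     l1 = []
--     l2 = []
--     i = 0
--     f = []
--     t = math.ceil(len(alist) / n)
--     for e in range(len(alist)):
--         l1.append(alist[e])
--         i += 1
--         if len(l1) == 3:
--             l1.sort()
--             l2 = alist[(e-2):e+1]
--             l3 = [l1[0],e - l2.index(l1[0])]
--             f.append(tuple(l3))
--             i = 0
--             l1 = []
--         elif e == len(alist) - 1 :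
--             l1.sort()
--             l2 = alist[e-i+1:e+1]
--             l3 = [l1[0],e - l2.index(l1[0])]
--             f.append(tuple(l3))
--     return f
-- ===== SOURCE B (Python) =====
-- def local_minima(alist, n):
--     out = []
--     for start in range(0, len(alist), 3):
--         chunk = alist[start:start+3]
--         end = start + len(chunk) - 1
--         m = min(chunk)
--         out.append((m, end - chunk.index(m)))
--     return out
-- ===== Notes on version B (the rewrite author's own statement) =====
-- stated objective: simpler
-- what changed: B replaces A's element-by-element accumulator list, reset counter, len==3 trigger, sort-to-find-min and separate last-element elif with a single loop over chunk starts (range(0, len, 3)) that slices each chunk and takes its min and first index directly.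
import Mathlib
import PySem

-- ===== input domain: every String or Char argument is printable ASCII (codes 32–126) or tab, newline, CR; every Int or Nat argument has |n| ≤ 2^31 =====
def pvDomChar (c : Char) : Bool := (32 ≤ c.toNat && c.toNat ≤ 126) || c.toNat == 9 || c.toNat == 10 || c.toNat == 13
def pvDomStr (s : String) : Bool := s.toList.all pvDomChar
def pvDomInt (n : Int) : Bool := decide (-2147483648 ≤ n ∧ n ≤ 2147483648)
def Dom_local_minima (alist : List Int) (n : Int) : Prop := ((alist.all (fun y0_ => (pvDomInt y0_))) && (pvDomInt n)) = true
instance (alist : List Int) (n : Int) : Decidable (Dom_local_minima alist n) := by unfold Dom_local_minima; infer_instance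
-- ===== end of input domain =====

-- B replaces A's element-by-element accumulator/counter/sort-then-chunk machinery with one loop
-- over chunk starts (range step 3) taking min and first index of each slice: simpler, same values.

-- ===== PORT A =====
-- loop body of A's 'for e in range(len(alist))'; loop state = (l1, i, f); l2, l3 are per-iteration locals
def aStep (alist : List Int) (st : List Int × Int × List (Int × Int)) (e : Int) :
    List Int × Int × List (Int × Int) :=
  let l1 := st.1 ++ [PySem.List.pyGetD alist e 0]   -- l1.append(alist[e]); e ∈ range(len) so in range
  let i := st.2.1 + 1
  let f := st.2.2
  if l1.length = 3 then
    let l1s := PySem.List.sorted l1 (fun x => x) false   -- l1.sort()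
    let l2 := PySem.List.slice alist (some (e - 2)) (some (e + 1))
    let m := PySem.List.pyGetD l1s 0 0                   -- l1[0]
    let l3 := (m, e - ((PySem.List.index? l2 m).getD 0 : Nat))   -- l2.index(l1[0]) always succeeds here
    ([], 0, f ++ [l3])
  else if e = (alist.length : Int) - 1 then
    let l1s := PySem.List.sorted l1 (fun x => x) false
    let l2 := PySem.List.slice alist (some (e - i + 1)) (some (e + 1))
    let m := PySem.List.pyGetD l1s 0 0
    let l3 := (m, e - ((PySem.List.index? l2 m).getD 0 : Nat))
    (l1s, i, f ++ [l3])                                  -- l1 was sorted in place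
  else (l1, i, f)

-- t = math.ceil(len(alist) / n): value never used by A; ported as exact ceiling division.
-- n = 0 (Python: ZeroDivisionError) is excluded by Pre_local_minima.
def local_minima (alist : List Int) (n : Int) : List (Int × Int) :=
  let _t : Int := -(PySem.Int.floordiv (-(alist.length : Int)) n)
  ((PySem.List.pyRange 0 (alist.length : Int) 1).foldl (aStep alist) ([], 0, [])).2.2

-- ===== PORT B =====
-- loop body of B's 'for start in range(0, len(alist), 3)'
def bStep (alist : List Int) (out : List (Int × Int)) (start : Int) : List (Int × Int) :=
  let chunk := PySem.List.slice alist (some start) (some (start + 3))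
  let e := start + (chunk.length : Int) - 1
  let m := (PySem.List.min? chunk (fun x => x)).getD 0   -- min(chunk); chunk ≠ [] since start < len
  out ++ [(m, e - ((PySem.List.index? chunk m).getD 0 : Nat))]

def local_minima_alt (alist : List Int) (n : Int) : List (Int × Int) :=
  (PySem.List.pyRange 0 (alist.length : Int) 3).foldl (bStep alist) []

-- ===== PRECONDITION & SPEC =====
-- Pre_ excludes only n = 0, where A raises ZeroDivisionError in math.ceil(len(alist)/n).
def Pre_local_minima (alist : List Int) (n : Int) : Prop := n ≠ 0
instance (alist : List Int) (n : Int) : Decidable (Pre_local_minima alist n) := by unfold Pre_local_minima; infer_instance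
def pvWitness_local_minima : List Int × Int := ([5, 1, 3, 2, 7, 4, 9], 2)

def Spec_local_minima (alist : List Int) (n : Int) (out : List (Int × Int)) : Prop := out = local_minima_alt alist n
instance (alist : List Int) (n : Int) (out : List (Int × Int)) : Decidable (Spec_local_minima alist n out) := by unfold Spec_local_minima; infer_instance

-- ===== CLAIM (what is proved, stated in full; the proofs are below) =====
def Claim_equal_local_minima : Prop := ∀ (alist : List Int) (n : Int), Dom_local_minima alist n → Pre_local_minima alist n → Spec_local_minima alist n (local_minima alist n)

-- ===== LEMMAS AND PROOFS =====

-- the common chunk recursion both loops compute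
def chunks (alist : List Int) (s : Nat) : List (Int × Int) :=
  if s < alist.length then bStep alist [] (s : Int) ++ chunks alist (s + 3) else []
termination_by alist.length - s
decreasing_by omega

lemma chunks_stop (alist : List Int) (s : Nat) (h : alist.length ≤ s) : chunks alist s = [] := by
  rw [chunks, if_neg (by omega)]

lemma pyRange3_nil {a b : Int} (h : b ≤ a) : PySem.List.pyRange a b 3 = [] := by
  rw [PySem.List.pyRange_of_pos a b (by norm_num), if_neg (by omega)]
  simp

lemma pyRange3_cons {a b : Int} (h : a < b) :
    PySem.List.pyRange a b 3 = a :: PySem.List.pyRange (a + 3) b 3 := by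
  rw [PySem.List.pyRange_of_pos a b (by norm_num),
      PySem.List.pyRange_of_pos (a + 3) b (by norm_num), if_pos h]
  by_cases h2 : a + 3 < b
  · rw [if_pos h2]
    have hcount : ((b - a + 3 - 1) / 3).toNat = ((b - (a + 3) + 3 - 1) / 3).toNat + 1 := by omega
    rw [hcount, List.range_succ_eq_map]
    simp only [List.map_cons, List.map_map, Nat.cast_zero]
    congr 1
    · ring
    · refine List.map_congr_left fun k _ => ?_
      simp only [Function.comp]
      push_cast
      ring
  · rw [if_neg h2]
    have hcount : ((b - a + 3 - 1) / 3).toNat = 1 := by omega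
    rw [hcount]
    simp

lemma head_sorted_eq_min (c : List Int) (hc : c ≠ []) :
    PySem.List.pyGetD (PySem.List.sorted c (fun x => x) false) 0 0
      = (PySem.List.min? c (fun x => x)).getD 0 := by
  obtain ⟨m, t, hst⟩ : ∃ m t, PySem.List.sorted c (fun x => x) false = m :: t := by
    cases h : PySem.List.sorted c (fun x => x) false with
    | nil =>
        have hp := PySem.List.sorted_perm c (fun x => x) false
        rw [h] at hp
        exact absurd hp.symm.eq_nil hc
    | cons m t => exact ⟨m, t, rfl⟩
  obtain ⟨mn, hmn⟩ : ∃ mn, PySem.List.min? c (fun x => x) = some mn := by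
    cases h : PySem.List.min? c (fun x => x) with
    | none => exact absurd ((PySem.List.min?_eq_none_iff c (fun x => x)).mp h) hc
    | some mn => exact ⟨mn, rfl⟩
  have h1 := PySem.List.key_head_sorted_le c (fun x => x) hst
  have h2 := PySem.List.min?_isMin hmn
  have hmem_m : m ∈ c := by
    have := PySem.List.sorted_perm c (fun x => x) false
    rw [hst] at this
    exact this.mem_iff.mp (List.mem_cons_self)
  have hmem_mn : mn ∈ c := PySem.List.min?_mem hmn
  rw [hst, hmn]
  simp only [PySem.List.pyGetD_zero_cons, Option.getD_some]
  exact le_antisymm (h1 mn hmem_mn) (h2 m hmem_m)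

lemma B_loop (alist : List Int) :
    ∀ (k s : Nat) (out : List (Int × Int)), alist.length - s ≤ k →
      (PySem.List.pyRange (s : Int) (alist.length : Int) 3).foldl (bStep alist) out
        = out ++ chunks alist s := by
  intro k
  induction k with
  | zero =>
      intro s out h
      rw [pyRange3_nil (by omega), chunks_stop alist s (by omega)]
      simp
  | succ k ih =>
      intro s out h
      by_cases hs : s < alist.length
      · conv_rhs => rw [chunks]
        rw [if_pos hs, pyRange3_cons (by exact_mod_cast hs), List.foldl_cons]
        have h3 : ((s : Int) + 3) = ((s + 3 : Nat) : Int) := by push_cast; ring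
        rw [h3, ih (s + 3) _ (by omega)]
        simp [bStep]
      · rw [pyRange3_nil (by omega), chunks_stop alist s (by omega)]
        simp

lemma getD_drop_cons {alist : List Int} {s : Nat} {a : Int} {r : List Int}
    (h : alist.drop s = a :: r) : alist.getD s 0 = a := by
  have h0 : alist[s]? = some a := by
    have h1 : (alist.drop s)[0]? = alist[s + 0]? := List.getElem?_drop
    rw [h] at h1
    simpa using h1.symm
  simp [List.getD_eq_getElem?_getD, h0]

lemma drop_succ_of_drop_cons {alist : List Int} {s : Nat} {a : Int} {r : List Int}
    (h : alist.drop s = a :: r) : alist.drop (s + 1) = r := by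
  rw [← List.tail_drop, h]
  rfl

lemma A_loop (alist : List Int) :
    ∀ (k s : Nat) (f : List (Int × Int)), alist.length - s ≤ k →
      ((PySem.List.pyRange (s : Int) (alist.length : Int) 1).foldl (aStep alist) ([], 0, f)).2.2
        = f ++ chunks alist s := by
  intro k
  induction k with
  | zero =>
      intro s f h
      rw [PySem.List.pyRange_one_eq_nil (by omega), chunks_stop alist s (by omega)]
      simp
  | succ k ih =>
      intro s f h
      by_cases hs : s < alist.length
      · have hlen : (alist.drop s).length = alist.length - s := List.length_drop ..
        by_cases hs3 : s + 3 ≤ alist.length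
        · -- a full chunk of three
          obtain ⟨a, b, c, t, hd⟩ : ∃ a b c t, alist.drop s = a :: b :: c :: t := by
            match hm : alist.drop s with
            | [] => rw [hm] at hlen; simp at hlen; omega
            | [a] => rw [hm] at hlen; simp at hlen; omega
            | [a, b] => rw [hm] at hlen; simp at hlen; omega
            | a :: b :: c :: t => exact ⟨a, b, c, t, rfl⟩
          have hd1 : alist.drop (s + 1) = b :: c :: t := drop_succ_of_drop_cons hd
          have hd2 : alist.drop (s + 2) = c :: t := drop_succ_of_drop_cons hd1
          have ha : alist.getD s 0 = a := getD_drop_cons hd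
          have hb : alist.getD (s + 1) 0 = b := getD_drop_cons hd1
          have hc : alist.getD (s + 2) 0 = c := getD_drop_cons hd2
          have hslice : PySem.List.slice alist (some (s : Int)) (some ((s : Int) + 3)) = [a, b, c] := by
            have h3 : ((s : Int) + 3) = ((s : Int) + ((3 : Nat) : Int)) := by push_cast; ring
            rw [h3, PySem.List.slice_natCast_add, hd]
            rfl
          have hx0 : PySem.List.pyGetD alist (s : Int) 0 = a := by
            rw [PySem.List.pyGetD_natCast, ha]
          have hx1 : PySem.List.pyGetD alist ((s : Int) + 1) 0 = b := by
            rw [show ((s : Int) + 1) = ((s + 1 : Nat) : Int) by push_cast; ring,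
                PySem.List.pyGetD_natCast, hb]
          have hx2 : PySem.List.pyGetD alist ((s : Int) + 2) 0 = c := by
            rw [show ((s : Int) + 2) = ((s + 2 : Nat) : Int) by push_cast; ring,
                PySem.List.pyGetD_natCast, hc]
          have head3 := head_sorted_eq_min [a, b, c] (by simp)
          have hA1 : aStep alist ([], 0, f) (s : Int) = ([a], 1, f) := by
            simp only [aStep, hx0, List.nil_append]
            rw [if_neg (by simp), if_neg (by omega)]
            norm_num
          have hA2 : aStep alist ([a], 1, f) ((s : Int) + 1) = ([a, b], 2, f) := by
            simp only [aStep, hx1]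
            rw [if_neg (by simp), if_neg (by omega)]
            norm_num
          have hA3 : aStep alist ([a, b], 2, f) ((s : Int) + 2)
              = ([], 0, f ++ bStep alist [] (s : Int)) := by
            simp only [aStep, bStep, hx2]
            rw [if_pos (by simp)]
            rw [show ((s : Int) + 2 - 2) = (s : Int) by ring,
                show ((s : Int) + 2 + 1) = ((s : Int) + 3) by ring, hslice]
            simp only [List.cons_append, List.nil_append, head3, List.length_cons,
              List.length_nil]
            push_cast
            ring_nf
          rw [PySem.List.pyRange_one_cons (show (s : Int) < (alist.length : Int) by exact_mod_cast hs),
              PySem.List.pyRange_one_cons (show (s : Int) + 1 < (alist.length : Int) by omega),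
              show ((s : Int) + 1 + 1) = ((s : Int) + 2) by ring,
              PySem.List.pyRange_one_cons (show (s : Int) + 2 < (alist.length : Int) by omega),
              List.foldl_cons, List.foldl_cons, List.foldl_cons, hA1, hA2, hA3,
              show ((s : Int) + 2 + 1) = ((s + 3 : Nat) : Int) by push_cast; ring,
              ih (s + 3) _ (by omega)]
          conv_rhs => rw [chunks]
          rw [if_pos hs]
          simp
        · -- tail of one or two elements
          by_cases hs1 : alist.length = s + 1
          · obtain ⟨a, hd⟩ : ∃ a, alist.drop s = [a] := by
              match hm : alist.drop s with
              | [] => rw [hm] at hlen; simp at hlen; omega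
              | [a] => exact ⟨a, rfl⟩
              | a :: b :: t => exfalso; rw [hm] at hlen; simp at hlen; omega
            have ha : alist.getD s 0 = a := getD_drop_cons hd
            have hx0 : PySem.List.pyGetD alist (s : Int) 0 = a := by
              rw [PySem.List.pyGetD_natCast, ha]
            have hslice1 : PySem.List.slice alist (some (s : Int)) (some ((s : Int) + 1)) = [a] := by
              rw [show ((s : Int) + 1) = ((s : Int) + ((1 : Nat) : Int)) by push_cast; ring,
                  PySem.List.slice_natCast_add, hd]
              rfl
            have hslice3 : PySem.List.slice alist (some (s : Int)) (some ((s : Int) + 3)) = [a] := by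
              rw [show ((s : Int) + 3) = ((s : Int) + ((3 : Nat) : Int)) by push_cast; ring,
                  PySem.List.slice_natCast_add, hd]
              rfl
            have head1 := head_sorted_eq_min [a] (by simp)
            rw [PySem.List.pyRange_one_cons (show (s : Int) < (alist.length : Int) by exact_mod_cast hs),
                List.foldl_cons,
                PySem.List.pyRange_one_eq_nil (show (alist.length : Int) ≤ (s : Int) + 1 by omega)]
            conv_rhs => rw [chunks]
            rw [if_pos hs, chunks_stop alist (s + 3) (by omega)]
            simp only [aStep, bStep, hx0, List.nil_append, List.foldl_nil]
            rw [if_neg (by simp), if_pos (by omega : (s : Int) = (alist.length : Int) - 1)]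
            rw [show ((s : Int) - (0 + 1) + 1) = (s : Int) by ring, hslice1, hslice3]
            simp only [head1, List.length_cons, List.length_nil,
              List.append_nil]
            push_cast
            ring_nf
          · -- alist.length = s + 2
            have hs2 : alist.length = s + 2 := by omega
            obtain ⟨a, b, hd⟩ : ∃ a b, alist.drop s = [a, b] := by
              match hm : alist.drop s with
              | [] => rw [hm] at hlen; simp at hlen; omega
              | [a] => exfalso; rw [hm] at hlen; simp at hlen; omega
              | [a, b] => exact ⟨a, b, rfl⟩
              | a :: b :: c :: t => exfalso; rw [hm] at hlen; simp at hlen; omega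
            have hd1 : alist.drop (s + 1) = [b] := drop_succ_of_drop_cons hd
            have ha : alist.getD s 0 = a := getD_drop_cons hd
            have hb : alist.getD (s + 1) 0 = b := getD_drop_cons hd1
            have hx0 : PySem.List.pyGetD alist (s : Int) 0 = a := by
              rw [PySem.List.pyGetD_natCast, ha]
            have hx1 : PySem.List.pyGetD alist ((s : Int) + 1) 0 = b := by
              rw [show ((s : Int) + 1) = ((s + 1 : Nat) : Int) by push_cast; ring,
                  PySem.List.pyGetD_natCast, hb]
            have hslice2 : PySem.List.slice alist (some (s : Int)) (some ((s : Int) + 2)) = [a, b] := by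
              rw [show ((s : Int) + 2) = ((s : Int) + ((2 : Nat) : Int)) by push_cast; ring,
                  PySem.List.slice_natCast_add, hd]
              rfl
            have hslice3 : PySem.List.slice alist (some (s : Int)) (some ((s : Int) + 3)) = [a, b] := by
              rw [show ((s : Int) + 3) = ((s : Int) + ((3 : Nat) : Int)) by push_cast; ring,
                  PySem.List.slice_natCast_add, hd]
              rfl
            have head2 := head_sorted_eq_min [a, b] (by simp)
            have hA1 : aStep alist ([], 0, f) (s : Int) = ([a], 1, f) := by
              simp only [aStep, hx0, List.nil_append]
              rw [if_neg (by simp), if_neg (by omega)]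
              norm_num
            rw [PySem.List.pyRange_one_cons (show (s : Int) < (alist.length : Int) by exact_mod_cast hs),
                PySem.List.pyRange_one_cons (show (s : Int) + 1 < (alist.length : Int) by omega),
                List.foldl_cons, List.foldl_cons, hA1,
                PySem.List.pyRange_one_eq_nil (show (alist.length : Int) ≤ (s : Int) + 1 + 1 by omega)]
            conv_rhs => rw [chunks]
            rw [if_pos hs, chunks_stop alist (s + 3) (by omega)]
            simp only [aStep, bStep, hx1, List.foldl_nil]
            rw [if_neg (by simp), if_pos (by omega : (s : Int) + 1 = (alist.length : Int) - 1)]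
            rw [show ((s : Int) + 1 - (1 + 1) + 1) = (s : Int) by ring,
                show ((s : Int) + 1 + 1) = ((s : Int) + 2) by ring, hslice2, hslice3]
            simp only [List.cons_append, List.nil_append, head2, List.length_cons,
              List.length_nil, List.append_nil]
            push_cast
            ring_nf
      · rw [PySem.List.pyRange_one_eq_nil (by omega), chunks_stop alist s (by omega)]
        simp

theorem local_minima_spec : Claim_equal_local_minima := by
  intro alist n _ _
  unfold Spec_local_minima local_minima local_minima_alt
  have hA := A_loop alist alist.length 0 [] (by omega)
  have hB := B_loop alist alist.length 0 [] (by omega)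
  simp only [Nat.cast_zero] at hA hB
  simp only [hA, hB, List.nil_append]
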